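-- pv_equiv track=rewrite | github.com/likthvishal/Slot-Tagging-and-Relation-Extraction | relation_extraction/deeplearning/helpers.py | combine_objs
-- ===== SOURCE A (Python) =====
-- def combine_objs(x,objs):
--     y=x
--     x=x.split()
--     combs=[x[i:j] for i in range(len(x)) for j in range(i+1,len(x)+1)]
--     combs=sorted(combs,key=len,reverse=True)
--     used={i:False for i in x}
--
--     def can_use(words_set):
--         for i in words_set:
--             if(used[i]==True):
--                 return False
--         return True
--
--     def using(words_set):
--         for i in words_set:
--             used[i]=True
--
--     for words_set in combs:
--         sent=(' ').join(words_set)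
--         if sent in objs.keys() and can_use(words_set):
--             using(words_set)
--             if(objs[sent] in ['actor','character','director','producer','subject','genre','country']):
--                 y=y.replace(sent,'<'+objs[sent]+'> '+sent)
--     return y
-- ===== SOURCE B (Python) =====
-- def combine_objs(x, objs):
--     words = x.split()
--     n = len(words)
--     # Invert the problem: instead of enumerating every contiguous span of words,
--     # look each dictionary key up in the word list and record where it occurs.
--     events = []
--     for sent, tag in objs.items():
--         ks = sent.split()
--         L = len(ks)
--         if L == 0 or ' '.join(ks) != sent:
--             continue  # such a key can never equal a join of words
--         for i in range(n - L + 1):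
--             if words[i:i + L] == ks:
--                 events.append((L, i, sent, tag))
--     # longest first, then leftmost: 0 <= i <= n, so a single integer key suffices
--     events.sort(key=lambda e: e[1] - e[0] * (n + 1))
--     y = x
--     used = set()
--     whitelist = {'actor', 'character', 'director', 'producer', 'subject', 'genre', 'country'}
--     for L, i, sent, tag in events:
--         ws = words[i:i + L]
--         if used.isdisjoint(ws):
--             used.update(ws)
--             if tag in whitelist:
--                 y = y.replace(sent, '<' + tag + '> ' + sent)
--     return y
-- ===== Notes on version B (the rewrite author's own statement) =====
-- stated objective: alternative
-- what changed: B inverts the search: instead of materialising and stable-sorting all O(n^2) contiguous word spans and probing the dict for each, it scans the dictionary's keys, locates each key's occurrences in the word list, sorts only those hits longest-first/leftmost with a single integer key, and runs the greedy marking with a set of used words.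
import Mathlib
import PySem

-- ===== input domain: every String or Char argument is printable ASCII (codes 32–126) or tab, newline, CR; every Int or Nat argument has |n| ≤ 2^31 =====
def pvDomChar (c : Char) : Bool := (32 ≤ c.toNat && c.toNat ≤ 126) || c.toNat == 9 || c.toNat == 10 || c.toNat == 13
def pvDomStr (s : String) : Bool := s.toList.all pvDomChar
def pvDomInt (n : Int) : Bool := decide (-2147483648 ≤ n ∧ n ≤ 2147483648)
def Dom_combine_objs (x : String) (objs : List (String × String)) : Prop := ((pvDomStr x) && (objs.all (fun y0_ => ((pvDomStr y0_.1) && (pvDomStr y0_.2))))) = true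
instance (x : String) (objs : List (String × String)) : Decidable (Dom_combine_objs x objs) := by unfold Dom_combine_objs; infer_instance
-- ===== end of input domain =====

-- B inverts A's search: A enumerates every contiguous word span and stable-sorts them by length;
-- B looks each dictionary key up in the word list, sorts only those hits longest-first/leftmost,
-- and runs the greedy marking with a set of used words; objective: alternative algorithm.

-- ===== PORT A =====
def pvWhitelistA : List String :=
  ["actor", "character", "director", "producer", "subject", "genre", "country"]

-- A's can_use; 'used[i]' is exact as getD: every word of a slice is a key of used
def pvCanUse (used : PySem.Dict String Bool) : List String → Bool
  | [] => true
  | w :: ws => if (used.getD w false) == true then false else pvCanUse used ws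

-- A's using: for i in words_set: used[i] = True
def pvUsing (used : PySem.Dict String Bool) : List String → PySem.Dict String Bool
  | [] => used
  | w :: ws => pvUsing (used.insert w true) ws

-- the body of A's 'for words_set in combs' loop, over the state (y, used)
def pvStepA (d : PySem.Dict String String) (st : String × PySem.Dict String Bool)
    (wordsSet : List String) : String × PySem.Dict String Bool :=
  let sent := PySem.Str.join " " wordsSet
  if d.contains sent && pvCanUse st.2 wordsSet then
    let used := pvUsing st.2 wordsSet
    -- objs[sent]: exact as getD, the 'sent in objs.keys()' guard holds
    let tag := d.getD sent ""
    if pvWhitelistA.contains tag then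
      (PySem.Str.replace st.1 sent ("<" ++ tag ++ "> " ++ sent), used)
    else (st.1, used)
  else st

def combine_objs (x : String) (objs : List (String × String)) : String :=
  let words := PySem.Str.split₀ x
  let combs := (PySem.List.pyRange 0 (words.length : Int) 1).flatMap (fun i =>
    (PySem.List.pyRange (i + 1) ((words.length : Int) + 1) 1).map (fun j =>
      PySem.List.slice words (some i) (some j)))
  let combs := PySem.List.sorted combs (fun ws => ws.length) true
  let used := words.foldl (fun d w => d.insert w false) PySem.Dict.empty
  let d := PySem.Dict.ofList objs
  (combs.foldl (pvStepA d) (x, used)).1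

-- ===== PORT B =====
def pvWhitelistB : PySem.Set String :=
  PySem.Set.ofList ["actor", "character", "director", "producer", "subject", "genre", "country"]

-- B's per-key scan: where does this dictionary key occur in the word list?
def pvGenB (words : List String) (n : Int) (kv : String × String) :
    List (Int × Int × String × String) :=
  let ks := PySem.Str.split₀ kv.1
  let L : Int := (ks.length : Int)
  if L == 0 || !(PySem.Str.join " " ks == kv.1) then []
  else (PySem.List.pyRange 0 (n - L + 1) 1).flatMap (fun i =>
    if PySem.List.slice words (some i) (some (i + L)) == ks then [(L, i, kv.1, kv.2)] else [])

-- the body of B's 'for (L, i, sent, tag) in events' loop, over the state (y, used)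
def pvStepB (words : List String) (st : String × PySem.Set String)
    (e : Int × Int × String × String) : String × PySem.Set String :=
  let ws := PySem.List.slice words (some e.2.1) (some (e.2.1 + e.1))
  if PySem.Set.isdisjoint st.2 ws then
    let used := PySem.Set.update st.2 ws
    if decide (e.2.2.2 ∈ pvWhitelistB) then
      (PySem.Str.replace st.1 e.2.2.1 ("<" ++ e.2.2.2 ++ "> " ++ e.2.2.1), used)
    else (st.1, used)
  else st

def combine_objs_alt (x : String) (objs : List (String × String)) : String :=
  let words := PySem.Str.split₀ x
  let n : Int := (words.length : Int)
  let d := PySem.Dict.ofList objs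
  let events := d.items.flatMap (pvGenB words n)
  -- longest first, then leftmost: 0 <= i <= n, so the single integer key i - L*(n+1) sorts it
  let events := PySem.List.sorted events (fun e => e.2.1 - e.1 * (n + 1)) false
  ((events.foldl (pvStepB words) (x, (PySem.Set.empty : PySem.Set String))).1)

-- ===== PRECONDITION & SPEC =====
def Spec_combine_objs (x : String) (objs : List (String × String)) (out : String) : Prop := out = combine_objs_alt x objs
instance (x : String) (objs : List (String × String)) (out : String) : Decidable (Spec_combine_objs x objs out) := by unfold Spec_combine_objs; infer_instance

-- ===== CLAIM (what is proved, stated in full; the proofs are below) =====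
def Claim_equal_combine_objs : Prop := ∀ (x : String) (objs : List (String × String)), Dom_combine_objs x objs → Spec_combine_objs x objs (combine_objs x objs)

-- ===== LEMMAS AND PROOFS =====

-- proof-only abbreviations
def pvCells (n : Nat) : List (Nat × Nat) :=
  (List.range n).flatMap (fun j => (List.range (j + 1)).map (fun i => (n - j, i)))

def pvSent (words : List String) (c : Nat × Nat) : String :=
  PySem.Str.join " " (List.take c.1 (List.drop c.2 words))

def pvEventOf (words : List String) (d : PySem.Dict String String) (c : Nat × Nat) :
    List (Int × Int × String × String) :=
  if d.contains (pvSent words c) then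
    [((c.1 : Int), (c.2 : Int), pvSent words c, d.getD (pvSent words c) "")]
  else []

def pvCellOf (e : Int × Int × String × String) : Nat × Nat := (e.1.toNat, e.2.1.toNat)

def pvRel (u : PySem.Dict String Bool) (s : PySem.Set String) : Prop :=
  ∀ w : String, u.getD w false = decide (w ∈ s)

-- flatMap congruence over members
theorem pv_flatMap_congr {α β : Type} (l : List α) (f g : α → List β)
    (h : ∀ a ∈ l, f a = g a) : l.flatMap f = l.flatMap g := by
  simp only [List.flatMap_def]
  rw [List.map_congr_left h]

-- A's can_use is an all-check
theorem pv_canUse_eq (u : PySem.Dict String Bool) (l : List String) :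
    pvCanUse u l = l.all (fun w => !(u.getD w false)) := by
  induction l with
  | nil => rfl
  | cons w ws ih =>
    simp only [pvCanUse, List.all_cons, ih]
    cases u.getD w false <;> simp

-- A's using is a foldl of inserts
theorem pv_using_eq (u : PySem.Dict String Bool) (l : List String) :
    pvUsing u l = l.foldl (fun u w => u.insert w true) u := by
  induction l generalizing u with
  | nil => rfl
  | cons w ws ih => simp only [pvUsing, List.foldl_cons, ih]

-- the two whitelist membership tests agree
theorem pv_whitelist_eq (t : String) :
    pvWhitelistA.contains t = decide (t ∈ pvWhitelistB) := by
  have h2 : t ∈ pvWhitelistB ↔ t ∈ pvWhitelistA :=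
    PySem.Set.mem_ofList pvWhitelistA t
  by_cases h : t ∈ pvWhitelistA <;> simp_all

-- insertBy walks past a prefix it does not go before
theorem pv_insertBy_append {α : Type} (before : α → α → Bool) (x : α)
    (l1 l2 : List α) (h : ∀ y ∈ l1, before x y = false) :
    PySem.List.insertBy before x (l1 ++ l2) = l1 ++ PySem.List.insertBy before x l2 := by
  induction l1 with
  | nil => simp
  | cons a t ih =>
    simp only [List.cons_append, PySem.List.insertBy, h a (by simp)]
    simp only [Bool.false_eq_true, if_false, List.cons.injEq, true_and]
    exact ih (fun y hy => h y (by simp [hy]))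

-- insertBy stops at the front of a block it goes before
theorem pv_insertBy_all_before {α : Type} (before : α → α → Bool) (x : α)
    (l : List α) (h : ∀ y ∈ l, before x y = true) :
    PySem.List.insertBy before x l = x :: l := by
  cases l with
  | nil => rfl
  | cons a t => simp [PySem.List.insertBy, h a (by simp)]

-- inserting into a key-descending bucket decomposition appends to the element's own bucket
theorem pv_insertBy_buckets {α : Type} (key : α → Nat) (x : α) :
    ∀ (ks : List Nat) (G : Nat → List α), ks.Pairwise (· > ·) →
    (∀ k ∈ ks, ∀ a ∈ G k, key a = k) → key x ∈ ks →
    PySem.List.insertBy (fun a b => decide (key b < key a)) x (ks.flatMap G)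
      = ks.flatMap (fun k => if key x = k then G k ++ [x] else G k) := by
  intro ks
  induction ks with
  | nil => intro G _ _ hx; simp at hx
  | cons k ks' ih =>
    intro G hks hG hx
    have hpair := (List.pairwise_cons.mp hks).1
    have hks' := (List.pairwise_cons.mp hks).2
    simp only [List.flatMap_cons]
    by_cases hxk : key x = k
    · rw [pv_insertBy_append _ _ _ _ (fun y hy => by
        have := hG k (by simp) y hy
        simp [this, hxk])]
      rw [pv_insertBy_all_before _ _ _ (fun y hy => by
        rcases List.mem_flatMap.mp hy with ⟨k', hk', hy'⟩
        have hlen := hG k' (by simp [hk']) y hy'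
        have : k' < k := hpair k' hk'
        simp [hlen, hxk]
        omega)]
      rw [if_pos hxk]
      have htail : List.flatMap (fun k' => if key x = k' then G k' ++ [x] else G k') ks'
          = List.flatMap G ks' :=
        pv_flatMap_congr ks' _ G (fun k' hk' => if_neg (by have := hpair k' hk'; omega))
      rw [htail]
      simp
    · have hx' : key x ∈ ks' := by
        rcases List.mem_cons.mp hx with h | h
        · exact absurd h hxk
        · exact h
      rw [pv_insertBy_append _ _ _ _ (fun y hy => by
        have hlen := hG k (by simp) y hy
        have : key x < k := hpair _ hx'
        simp [hlen]
        omega)]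
      rw [ih G hks' (fun k' hk' => hG k' (by simp [hk'])) hx']
      rw [if_neg hxk]

-- Python's stable reverse sort by a Nat key is the concatenation of the key-descending buckets
theorem pv_sorted_rev_buckets {α : Type} (key : α → Nat) (ks : List Nat)
    (hks : ks.Pairwise (· > ·)) :
    ∀ (xs : List α), (∀ a ∈ xs, key a ∈ ks) →
    PySem.List.sorted xs key true = ks.flatMap (fun k => xs.filter (fun a => key a == k)) := by
  intro xs
  induction xs using List.reverseRecOn with
  | nil => intro _; simp [PySem.List.sorted_rev_eq_foldl_insertBy]
  | append_singleton xs x ih =>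
    intro hall
    rw [PySem.List.sorted_rev_eq_foldl_insertBy, List.foldl_append, List.foldl_cons,
      List.foldl_nil, ← PySem.List.sorted_rev_eq_foldl_insertBy]
    rw [ih (fun a ha => hall a (by simp [ha]))]
    rw [pv_insertBy_buckets key x ks _ hks
      (fun k hk a ha => by
        have := List.mem_filter.mp ha
        simpa using this.2)
      (hall x (by simp))]
    apply pv_flatMap_congr
    intro k _
    rw [List.filter_append]
    by_cases h : key x = k
    · rw [if_pos h]; simp [h]
    · rw [if_neg h]; simp [h]

-- filtering a range for the unique hit
theorem pv_range_filter (m L : Nat) (h1 : 1 ≤ L) :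
    (List.range m).filter (fun t => t+1 == L) = if L ≤ m then [L-1] else [] := by
  induction m with
  | zero => rw [if_neg (by omega)]; simp
  | succ m ih =>
    rw [List.range_succ, List.filter_append, ih]
    by_cases h2 : L ≤ m
    · rw [if_pos h2, if_pos (by omega)]
      have : (m+1 == L) = false := by simp; omega
      simp [this]
    · by_cases h3 : L ≤ m+1
      · rw [if_neg h2, if_pos h3]
        have hm : m+1 = L := by omega
        simp [hm]
        omega
      · rw [if_neg h2, if_neg h3]
        have : (m+1 == L) = false := by simp; omega
        simp [this]

-- a guarded singleton flatMap over a range is a map over the shorter range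
theorem pv_flatMap_if {β : Type} (g : Nat → β) :
    ∀ (n' m : Nat), m ≤ n' →
    (List.range n').flatMap (fun a => if a < m then [g a] else []) = (List.range m).map g := by
  intro n'
  induction n' with
  | zero => intro m hm; have : m = 0 := by omega
            subst this; simp
  | succ n ih =>
    intro m hm
    rw [List.range_succ, List.flatMap_append, List.flatMap_singleton]
    by_cases h : m ≤ n
    · rw [ih m h, if_neg (by omega)]; simp
    · have hm1 : m = n + 1 := by omega
      subst hm1
      rw [pv_flatMap_congr _ _ (fun a => [g a]) (fun a ha => by
        rw [if_pos (by have := List.mem_range.mp ha; omega)])]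
      rw [if_pos (by omega), List.range_succ, List.map_append]
      congr 1
      exact Eq.symm List.map_eq_flatMap

-- A's comprehension of all contiguous slices, in Nat-range form
theorem pv_combs_eq (words : List String) :
    (PySem.List.pyRange 0 (words.length : Int) 1).flatMap (fun i =>
      (PySem.List.pyRange (i + 1) ((words.length : Int) + 1) 1).map (fun j =>
        PySem.List.slice words (some i) (some j)))
    = (List.range words.length).flatMap (fun a =>
        (List.range (words.length - a)).map (fun t => List.take (t+1) (List.drop a words))) := by
  rw [PySem.List.pyRange_zero_natCast]
  rw [List.flatMap_def, List.flatMap_def, List.map_map]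
  congr 1
  apply List.map_congr_left
  intro a ha
  have ha' : a < words.length := List.mem_range.mp ha
  dsimp only [Function.comp]
  rw [PySem.List.pyRange_of_pos _ _ (by norm_num : (0:Int) < 1)]
  rw [if_pos (by omega)]
  have hcount : ((((words.length : Int) + 1) - ((a : Int) + 1) + 1 - 1) / 1).toNat
      = words.length - a := by omega
  rw [hcount, List.map_map]
  apply List.map_congr_left
  intro t ht
  dsimp only [Function.comp]
  have harg : ((a : Int) + 1 + 1 * (t : Int)) = ((a : Int) + ((t + 1 : Nat) : Int)) := by
    push_cast; ring
  rw [harg, PySem.List.slice_natCast_add]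

-- the length-L bucket of the slice list, in generation order
theorem pv_filter_bucket (words : List String) (L : Nat) (h1 : 1 ≤ L) (h2 : L ≤ words.length) :
    ((List.range words.length).flatMap (fun a =>
      (List.range (words.length - a)).map (fun t => List.take (t+1) (List.drop a words)))).filter
        (fun ws => ws.length == L)
    = (List.range (words.length - L + 1)).map (fun i => List.take L (List.drop i words)) := by
  have hmem : ∀ a ∈ List.range words.length,
      List.filter (fun ws => ws.length == L)
        ((List.range (words.length - a)).map (fun t => List.take (t+1) (List.drop a words)))
      = if a < words.length - L + 1 then [List.take L (List.drop a words)] else [] := by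
    intro a ha
    have ha' : a < words.length := List.mem_range.mp ha
    rw [List.filter_map]
    have hp : ∀ t ∈ List.range (words.length - a),
        ((fun ws => ws.length == L) ∘ (fun t => List.take (t+1) (List.drop a words))) t
          = (t+1 == L) := by
      intro t ht
      have ht' : t < words.length - a := List.mem_range.mp ht
      simp only [Function.comp_apply, List.length_take, List.length_drop]
      have hmin : min (t+1) (words.length - a) = t + 1 := by omega
      rw [hmin]
    rw [List.filter_congr hp, pv_range_filter _ L h1]
    by_cases hc : L ≤ words.length - a
    · rw [if_pos hc, if_pos (by omega)]
      have hL : L - 1 + 1 = L := by omega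
      simp [hL]
    · rw [if_neg hc, if_neg (by omega)]
      simp
  rw [List.filter_flatMap, pv_flatMap_congr _ _ _ hmem, pv_flatMap_if _ _ _ (by omega)]

-- the descending key list [n, …, 1]
def pv_ks (n : Nat) : List Nat := (List.range n).map (fun j => n - j)

theorem pv_ks_pairwise (n : Nat) : (pv_ks n).Pairwise (· > ·) := by
  unfold pv_ks
  rw [List.pairwise_map]
  exact List.pairwise_lt_range.imp_of_mem (fun {a b} _ hb h => by
    have : b < n := List.mem_range.mp hb
    omega)

theorem pv_mem_ks (n k : Nat) : k ∈ pv_ks n ↔ 1 ≤ k ∧ k ≤ n := by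
  unfold pv_ks
  simp only [List.mem_map, List.mem_range]
  constructor
  · rintro ⟨j, hj, rfl⟩; omega
  · intro ⟨hk1, hk2⟩; exact ⟨n - k, by omega, by omega⟩

-- A's stable sort by length descending IS the longest-first, leftmost-first generation order
theorem pv_sorted_combs (words : List String) :
    PySem.List.sorted
      ((List.range words.length).flatMap (fun a =>
        (List.range (words.length - a)).map (fun t => List.take (t+1) (List.drop a words))))
      (fun ws => ws.length) true
    = (List.range words.length).flatMap (fun j =>
        (List.range (j+1)).map (fun i => List.take (words.length - j) (List.drop i words))) := by
  have hkeys : ∀ a ∈ (List.range words.length).flatMap (fun a =>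
      (List.range (words.length - a)).map (fun t => List.take (t+1) (List.drop a words))),
      (fun ws : List String => ws.length) a ∈ pv_ks words.length := by
    intro a ha
    simp only [List.mem_flatMap, List.mem_map, List.mem_range] at ha
    obtain ⟨i, hi, t, ht, rfl⟩ := ha
    rw [pv_mem_ks]
    simp only [List.length_take, List.length_drop]
    omega
  have hsort := pv_sorted_rev_buckets (fun ws : List String => ws.length) (pv_ks words.length)
    (pv_ks_pairwise words.length) _ hkeys
  rw [hsort]
  unfold pv_ks
  rw [List.flatMap_def, List.map_map, ← List.flatMap_def]
  apply pv_flatMap_congr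
  intro j hj
  have hj' : j < words.length := List.mem_range.mp hj
  dsimp only [Function.comp]
  rw [pv_filter_bucket words (words.length - j) (by omega) (by omega)]
  rw [show words.length - (words.length - j) + 1 = j + 1 by omega]

-- ==== B-side lemmas ====

-- words produced by split() are nonempty and whitespace-free
theorem pv_go_mem (s : List Char) : ∀ (cur : List Char) (acc : List (List Char)),
    (∀ c ∈ cur, PySem.Chars.isspace c = false) →
    (∀ w ∈ acc, w ≠ [] ∧ ∀ c ∈ w, PySem.Chars.isspace c = false) →
    ∀ w ∈ PySem.Chars.split₀.go s cur acc,
      w ≠ [] ∧ ∀ c ∈ w, PySem.Chars.isspace c = false := by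
  induction s with
  | nil =>
    intro cur acc hcur hacc w hw
    rw [PySem.Chars.split₀.go] at hw
    split at hw
    · exact hacc w (by simpa using hw)
    · rw [List.mem_reverse, List.mem_cons] at hw
      rcases hw with rfl | hw
      · constructor
        · simp only [ne_eq, List.reverse_eq_nil_iff]
          simpa [List.isEmpty_iff] using ‹¬ cur.isEmpty = true›
        · intro c hc; exact hcur c (by simpa using hc)
      · exact hacc w hw
  | cons c rest ih =>
    intro cur acc hcur hacc w hw
    rw [PySem.Chars.split₀.go] at hw
    split at hw
    · split at hw
      · exact ih [] acc (by simp) hacc w hw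
      · refine ih [] _ (by simp) ?_ w hw
        intro w' hw'
        rcases List.mem_cons.mp hw' with rfl | hw'
        · constructor
          · simp only [ne_eq, List.reverse_eq_nil_iff]
            simpa [List.isEmpty_iff] using ‹¬ cur.isEmpty = true›
          · intro c' hc'; exact hcur c' (by simpa using hc')
        · exact hacc w' hw'
    · refine ih (c :: cur) acc ?_ hacc w hw
      intro c' hc'
      rcases List.mem_cons.mp hc' with rfl | hc'
      · simpa using ‹¬ PySem.Chars.isspace c' = true›
      · exact hcur c' hc'

-- a whitespace-free block walks into the accumulator unchanged
theorem pv_go_word (w : List Char) (hw : ∀ c ∈ w, PySem.Chars.isspace c = false) :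
    ∀ (rest cur : List Char) (acc : List (List Char)),
    PySem.Chars.split₀.go (w ++ rest) cur acc
      = PySem.Chars.split₀.go rest (w.reverse ++ cur) acc := by
  induction w with
  | nil => simp
  | cons c t ih =>
    intro rest cur acc
    rw [List.cons_append, PySem.Chars.split₀.go, if_neg (by simp [hw c (by simp)])]
    rw [ih (fun c' hc' => hw c' (by simp [hc'])) rest (c :: cur) acc]
    simp

-- split() undoes ' '.join on nonempty whitespace-free words (List Char level)
theorem pv_split_join (wss : List (List Char))
    (h : ∀ w ∈ wss, w ≠ [] ∧ ∀ c ∈ w, PySem.Chars.isspace c = false) :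
    ∀ acc, PySem.Chars.split₀.go (PySem.Chars.join [' '] wss) [] acc = acc.reverse ++ wss := by
  induction wss with
  | nil =>
    intro acc
    rw [PySem.Chars.join_nil, PySem.Chars.split₀.go]
    simp
  | cons w t ih =>
    intro acc
    have hw := h w (by simp)
    cases t with
    | nil =>
      rw [PySem.Chars.join_singleton, show w = w ++ [] from (List.append_nil w).symm,
        pv_go_word w hw.2, PySem.Chars.split₀.go]
      rw [if_neg (by simp [List.isEmpty_iff, hw.1])]
      simp
    | cons w2 t2 =>
      rw [PySem.Chars.join_cons_cons, List.append_assoc, pv_go_word w hw.2,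
        List.singleton_append, PySem.Chars.split₀.go, if_pos (by decide),
        if_neg (by simp [List.isEmpty_iff, hw.1])]
      rw [List.append_nil, List.reverse_reverse]
      rw [ih (fun w' hw' => h w' (by simp [hw'])) (w :: acc)]
      simp

theorem pv_split_words (x : String) :
    ∀ w ∈ PySem.Str.split₀ x, w.toList ≠ [] ∧ ∀ c ∈ w.toList, PySem.Chars.isspace c = false := by
  intro w hw
  simp only [PySem.Str.split₀, List.mem_map] at hw
  obtain ⟨w', hw', rfl⟩ := hw
  rw [String.toList_ofList]
  exact pv_go_mem x.toList [] [] (by simp) (by simp) w' hw'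

-- split() is a left inverse of ' '.join on nonempty whitespace-free words
theorem pv_roundtrip (ws : List String)
    (h : ∀ w ∈ ws, w.toList ≠ [] ∧ ∀ c ∈ w.toList, PySem.Chars.isspace c = false) :
    PySem.Str.split₀ (PySem.Str.join " " ws) = ws := by
  have hj : (PySem.Str.join " " ws).toList = PySem.Chars.join [' '] (ws.map String.toList) := by
    rw [PySem.Str.join, String.toList_ofList]
    rfl
  rw [PySem.Str.split₀, hj]
  have := pv_split_join (ws.map String.toList)
    (fun w hw => by obtain ⟨w', hw', rfl⟩ := List.mem_map.mp hw; exact h w' hw') []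
  rw [show PySem.Chars.split₀ (PySem.Chars.join [' '] (ws.map String.toList))
      = PySem.Chars.split₀.go (PySem.Chars.join [' '] (ws.map String.toList)) [] [] from rfl,
    this]
  rw [List.reverse_nil, List.nil_append, List.map_map]
  exact (List.map_congr_left (fun w _ => String.ofList_toList)).trans (List.map_id _)

-- cells of the grid
theorem pv_mem_cells (n : Nat) (c : Nat × Nat) :
    c ∈ pvCells n ↔ 1 ≤ c.1 ∧ c.2 + c.1 ≤ n := by
  unfold pvCells
  simp only [List.mem_flatMap, List.mem_map, List.mem_range]
  constructor
  · rintro ⟨j, hj, i, hi, rfl⟩; simp; omega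
  · rintro ⟨h1, h2⟩
    exact ⟨n - c.1, by omega, c.2, by omega, by obtain ⟨a, b⟩ := c; simp at *; omega⟩

theorem pv_cells_pairwise (n : Nat) :
    (pvCells n).Pairwise (fun c c' =>
      (c.2 : Int) - (c.1 : Int) * ((n : Int) + 1) < (c'.2 : Int) - (c'.1 : Int) * ((n : Int) + 1)) := by
  unfold pvCells
  rw [List.flatMap_def, List.pairwise_flatten]
  refine ⟨?_, ?_⟩
  · intro l hl
    obtain ⟨j, hj, rfl⟩ := List.mem_map.mp hl
    rw [List.pairwise_map]
    refine List.pairwise_lt_range.imp_of_mem ?_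
    intro a b _ _ hab
    simp only
    omega
  · rw [List.pairwise_map]
    refine List.pairwise_lt_range.imp_of_mem ?_
    intro j j' hj hj' hlt x hx y hy
    obtain ⟨i, hi, rfl⟩ := List.mem_map.mp hx
    obtain ⟨i', hi', rfl⟩ := List.mem_map.mp hy
    rw [List.mem_range] at hi hi' hj hj'
    simp only
    have e1 : ((n - j : Nat) : Int) * ((n:Int)+1) = ((n:Int) - j) * ((n:Int)+1) := by
      congr 1; omega
    have e2 : ((n - j' : Nat) : Int) * ((n:Int)+1) = ((n:Int) - j') * ((n:Int)+1) := by
      congr 1; omega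
    rw [e1, e2]
    nlinarith [Int.natCast_nonneg i', (by exact_mod_cast Nat.lt_succ_iff.mp hi : (i:Int) ≤ (j:Int)),
      (by exact_mod_cast hlt : (j:Int) < (j':Int)), (by exact_mod_cast hj'.le : (j':Int) ≤ (n:Int))]

theorem pv_cells_nodup (n : Nat) : (pvCells n).Nodup :=
  (pv_cells_pairwise n).imp (fun {a b} h => by rintro rfl; exact lt_irrefl _ h)

-- flatMap of a family that is empty away from one point
theorem pv_flatMap_single {β : Type} (l : List Int) (hnd : l.Nodup) (t : Int)
    (G : Int → List β) (hG : ∀ a ∈ l, a ≠ t → G a = []) :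
    l.flatMap G = if t ∈ l then G t else [] := by
  induction l with
  | nil => simp
  | cons a l ih =>
    rw [List.flatMap_cons]
    by_cases hat : a = t
    · subst hat
      rw [if_pos (by simp)]
      have : l.flatMap G = [] := by
        apply List.flatMap_eq_nil_iff.mpr
        intro b hb
        exact hG b (by simp [hb]) (fun hbt => (List.nodup_cons.mp hnd).1 (hbt ▸ hb))
      rw [this, List.append_nil]
    · rw [hG a (by simp) hat, List.nil_append,
        ih (List.nodup_cons.mp hnd).2 (fun b hb => hG b (by simp [hb]))]
      by_cases htl : t ∈ l
      · rw [if_pos htl, if_pos (by simp [htl])]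
      · rw [if_neg htl, if_neg (by simp [htl, Ne.symm hat])]

-- bucketing a list by a classifier is a permutation
theorem pv_flatMap_filter_perm {β γ : Type} [DecidableEq γ] (cf : β → γ) :
    ∀ (ks : List γ) (l : List β), ks.Nodup → (∀ e ∈ l, cf e ∈ ks) →
    (ks.flatMap (fun c => l.filter (fun e => decide (cf e = c)))).Perm l := by
  intro ks
  induction ks with
  | nil =>
    intro l _ h
    simp only [List.flatMap_nil]
    cases l with
    | nil => exact List.Perm.refl _
    | cons e l => exact absurd (h e (by simp)) (by simp)
  | cons c ks ih =>
    intro l hnd h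
    rw [List.flatMap_cons]
    have hrest : ks.flatMap (fun c' => l.filter (fun e => decide (cf e = c')))
        = ks.flatMap (fun c' => (l.filter (fun e => !decide (cf e = c))).filter
            (fun e => decide (cf e = c'))) := by
      apply List.flatMap_congr
      intro x hx
      have hxc : x ≠ c := fun hxc => (List.nodup_cons.mp hnd).1 (hxc ▸ hx)
      rw [List.filter_filter]
      apply List.filter_congr
      intro e _
      by_cases he : cf e = x
      · simp only [he, decide_true, Bool.true_and]
        simp [hxc]
      · simp [he]
    rw [hrest]
    have step := ih (l.filter (fun e => !decide (cf e = c)))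
      (List.nodup_cons.mp hnd).2
      (fun e he => by
        have h1 := List.mem_filter.mp he
        rcases List.mem_cons.mp (h (e) h1.1) with hc | hks
        · exact absurd (decide_eq_true hc) (by simpa using h1.2)
        · exact hks)
    exact ((List.Perm.append_left _ step).trans
      (List.filter_append_perm (fun e => decide (cf e = c)) l))

-- flatMap over a dict's items of a single-key match is a lookup
theorem pv_dict_flatMap_aux {β : Type} (g : String → List β) (k : String) :
    ∀ (l : List (String × String)), (l.map Prod.fst).Nodup →
    l.flatMap (fun kv => if kv.1 = k then g kv.2 else [])
      = match (PySem.Dict.mk l : PySem.Dict String String).get? k with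
        | some v => g v
        | none => [] := by
  intro l
  induction l with
  | nil =>
    intro _
    simp [PySem.Dict.get?]
  | cons kv t ih =>
    intro hnd
    obtain ⟨a, b⟩ := kv
    simp only [List.map_cons, List.nodup_cons] at hnd
    rw [List.flatMap_cons, PySem.Dict.get?_mk_cons]
    by_cases hak : a = k
    · rw [if_pos hak, show (a == k) = true by simpa using hak]
      have ht : t.flatMap (fun kv => if kv.1 = k then g kv.2 else []) = [] := by
        apply List.flatMap_eq_nil_iff.mpr
        intro kv' hkv'
        rw [if_neg]
        intro h1
        exact hnd.1 (hak ▸ h1 ▸ List.mem_map_of_mem hkv')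
      rw [ht, List.append_nil]
      simp
    · rw [if_neg hak, List.nil_append, ih hnd.2,
        show (a == k) = false by simpa using hak]
      simp

theorem pv_dict_flatMap {β : Type} (d : PySem.Dict String String) (hnd : d.keys.Nodup)
    (k : String) (g : String → List β) :
    d.items.flatMap (fun kv => if kv.1 = k then g kv.2 else [])
      = if d.contains k then g (d.getD k "") else [] := by
  obtain ⟨l⟩ := d
  rw [show (PySem.Dict.mk l).items = l from rfl]
  rw [pv_dict_flatMap_aux g k l (by simpa [PySem.Dict.keys] using hnd)]
  rw [PySem.Dict.contains_eq_isSome_get?, PySem.Dict.getD_eq_get?_getD]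
  cases (PySem.Dict.mk l).get? k <;> simp

theorem pv_gen_filter (x : String) (c : Nat × Nat)
    (hc1 : 1 ≤ c.1) (hc2 : c.2 + c.1 ≤ (PySem.Str.split₀ x).length) (kv : String × String) :
    (pvGenB (PySem.Str.split₀ x) ((PySem.Str.split₀ x).length : Int) kv).filter
        (fun e => decide (pvCellOf e = c))
      = if kv.1 = pvSent (PySem.Str.split₀ x) c then
          [((c.1 : Int), (c.2 : Int), kv.1, kv.2)] else [] := by
  obtain ⟨c1, c2⟩ := c
  simp only at hc1 hc2
  have hlen : (List.take c1 (List.drop c2 (PySem.Str.split₀ x))).length = c1 := by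
    simp only [List.length_take, List.length_drop]
    omega
  have hrt : PySem.Str.split₀ (pvSent (PySem.Str.split₀ x) (c1, c2))
      = List.take c1 (List.drop c2 (PySem.Str.split₀ x)) :=
    pv_roundtrip _ (fun w hw => pv_split_words x w (List.mem_of_mem_drop (List.mem_of_mem_take hw)))
  by_cases heq : kv.1 = pvSent (PySem.Str.split₀ x) (c1, c2)
  · rw [if_pos heq]
    simp only [pvGenB, heq, hrt, hlen]
    have hg : ((((c1 : Nat) : Int) == 0)
        || !(PySem.Str.join " " (List.take c1 (List.drop c2 (PySem.Str.split₀ x)))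
              == pvSent (PySem.Str.split₀ x) (c1, c2))) = false := by
      simp [pvSent]
      omega
    rw [hg]
    simp only [Bool.false_eq_true, if_false]
    rw [List.filter_flatMap]
    rw [pv_flatMap_single _ (PySem.List.nodup_pyRange_one _ _) ((c2 : Nat) : Int) _ ?hG]
    case hG =>
      intro a ha hane
      have ha0 : 0 ≤ a := (PySem.List.mem_pyRange_one.mp ha).1
      split
      · simp only [List.filter_cons, List.filter_nil]
        rw [if_neg]
        simp only [pvCellOf, decide_eq_true_eq, Prod.mk.injEq]
        intro h
        exact hane (by omega)
      · simp
    have hmem : ((c2 : Nat) : Int) ∈ PySem.List.pyRange 0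
        (((PySem.Str.split₀ x).length : Int) - ((c1 : Nat) : Int) + 1) 1 := by
      rw [PySem.List.mem_pyRange_one]
      constructor
      · positivity
      · omega
    rw [if_pos hmem]
    have hsl : PySem.List.slice (PySem.Str.split₀ x) (some ((c2 : Nat) : Int))
        (some (((c2 : Nat) : Int) + ((c1 : Nat) : Int)))
        = List.take c1 (List.drop c2 (PySem.Str.split₀ x)) :=
      PySem.List.slice_natCast_add _ _ _
    rw [hsl]
    simp [pvCellOf]
  · rw [if_neg heq]
    simp only [pvGenB]
    split
    · simp
    · rename_i hguard
      simp only [Bool.or_eq_true, not_or, Bool.not_eq_true', beq_eq_false_iff_ne, beq_iff_eq] at hguard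
      have hjoin : PySem.Str.join " " (PySem.Str.split₀ kv.1) = kv.1 := not_ne_iff.mp hguard.2
      rw [List.filter_flatMap]
      apply List.flatMap_eq_nil_iff.mpr
      intro a ha
      have ha0 : 0 ≤ a := (PySem.List.mem_pyRange_one.mp ha).1
      split
      · rename_i hsl
        rw [beq_iff_eq] at hsl
        simp only [List.filter_cons, List.filter_nil]
        rw [if_neg]
        simp only [pvCellOf, decide_eq_true_eq, Prod.mk.injEq]
        intro h
        have hL : ((PySem.Str.split₀ kv.1).length : Int) = ((c1 : Nat) : Int) := by omega
        have hai : a = ((c2 : Nat) : Int) := by omega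
        rw [hai, hL, PySem.List.slice_natCast_add] at hsl
        apply heq
        rw [← hjoin, pvSent, hsl]
      · simp

-- every generated event lies in the grid
theorem pv_event_cell (x : String) (d : PySem.Dict String String) :
    ∀ e ∈ d.items.flatMap (pvGenB (PySem.Str.split₀ x) ((PySem.Str.split₀ x).length : Int)),
      pvCellOf e ∈ pvCells (PySem.Str.split₀ x).length := by
  intro e he
  obtain ⟨kv, hkv, hgen⟩ := List.mem_flatMap.mp he
  simp only [pvGenB] at hgen
  split at hgen
  · simp at hgen
  · rename_i hguard
    simp only [Bool.or_eq_true, not_or, Bool.not_eq_true', beq_iff_eq] at hguard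
    obtain ⟨i, hi, hin⟩ := List.mem_flatMap.mp hgen
    rw [PySem.List.mem_pyRange_one] at hi
    split at hin
    · rw [List.mem_singleton] at hin
      subst hin
      rw [pv_mem_cells]
      simp only [pvCellOf]
      have h0 : (PySem.Str.split₀ kv.1).length ≠ 0 := by
        intro h
        exact hguard.1 (by exact_mod_cast h)
      omega
    · simp at hin

-- B's sort arranges the hits in the longest-first, leftmost-first grid order
theorem pv_sorted_events (x : String) (objs : List (String × String)) :
    PySem.List.sorted
      ((PySem.Dict.ofList objs).items.flatMap
        (pvGenB (PySem.Str.split₀ x) ((PySem.Str.split₀ x).length : Int)))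
      (fun e => e.2.1 - e.1 * (((PySem.Str.split₀ x).length : Int) + 1)) false
    = (pvCells (PySem.Str.split₀ x).length).flatMap
        (pvEventOf (PySem.Str.split₀ x) (PySem.Dict.ofList objs)) := by
  have hstep1 : ∀ c ∈ pvCells (PySem.Str.split₀ x).length,
      ((PySem.Dict.ofList objs).items.flatMap
        (pvGenB (PySem.Str.split₀ x) ((PySem.Str.split₀ x).length : Int))).filter
          (fun e => decide (pvCellOf e = c))
      = pvEventOf (PySem.Str.split₀ x) (PySem.Dict.ofList objs) c := by
    intro c hc
    rw [pv_mem_cells] at hc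
    rw [List.filter_flatMap]
    rw [pv_flatMap_congr _ _ _ (fun kv _ => pv_gen_filter x c hc.1 (by omega) kv)]
    have hfun : (fun kv : String × String =>
          if kv.1 = pvSent (PySem.Str.split₀ x) c then [((c.1 : Int), (c.2 : Int), kv.1, kv.2)] else [])
        = (fun kv : String × String =>
          if kv.1 = pvSent (PySem.Str.split₀ x) c then
            [((c.1 : Int), (c.2 : Int), pvSent (PySem.Str.split₀ x) c, kv.2)] else []) := by
      funext kv
      by_cases h : kv.1 = pvSent (PySem.Str.split₀ x) c
      · simp [h]
      · simp [h]
    rw [hfun, pv_dict_flatMap (PySem.Dict.ofList objs) (PySem.Dict.nodup_keys_ofList objs)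
      (pvSent (PySem.Str.split₀ x) c)
      (fun v => [((c.1 : Int), (c.2 : Int), pvSent (PySem.Str.split₀ x) c, v)])]
    rfl
  apply PySem.List.sorted_eq_of_perm_of_pairwise_lt
  · rw [← pv_flatMap_congr _ _ _ hstep1]
    exact pv_flatMap_filter_perm pvCellOf _ _ (pv_cells_nodup _) (pv_event_cell x _)
  · rw [List.flatMap_def, List.pairwise_flatten]
    constructor
    · intro l hl
      obtain ⟨c, hc, rfl⟩ := List.mem_map.mp hl
      unfold pvEventOf
      split
      · exact List.pairwise_singleton _ _
      · exact List.Pairwise.nil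
    · rw [List.pairwise_map]
      refine (pv_cells_pairwise (PySem.Str.split₀ x).length).imp_of_mem ?_
      intro c c' hc hc' h e he e' he'
      unfold pvEventOf at he he'
      split at he
      · rw [List.mem_singleton] at he
        split at he'
        · rw [List.mem_singleton] at he'
          subst he he'
          simpa using h
        · simp at he'
      · simp at he

-- used-dict / used-set bookkeeping
theorem pv_getD_insert_true (l : List String) (u : PySem.Dict String Bool) (w : String) :
    (l.foldl (fun u w => u.insert w true) u).getD w false
      = (u.getD w false || decide (w ∈ l)) := by
  induction l generalizing u with
  | nil => simp
  | cons a l ih =>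
    rw [List.foldl_cons, ih]
    rw [PySem.Dict.getD_insert]
    by_cases hw : w = a
    · subst hw; simp
    · simp [hw]

theorem pv_getD_insert_false (l : List String) (d : PySem.Dict String Bool) (w : String) :
    (l.foldl (fun d w => d.insert w false) d).getD w false
      = if w ∈ l then false else d.getD w false := by
  induction l generalizing d with
  | nil => simp
  | cons a l ih =>
    rw [List.foldl_cons, ih]
    rw [PySem.Dict.getD_insert]
    by_cases hw : w = a
    · subst hw; simp
    · by_cases hl : w ∈ l <;> simp [hw, hl]

theorem pv_isdisjoint_eq (s : PySem.Set String) (ws : List String) :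
    PySem.Set.isdisjoint s ws = ws.all (fun w => !(decide (w ∈ s))) := by
  rw [Bool.eq_iff_iff]
  rw [PySem.Set.isdisjoint_iff]
  simp only [List.all_eq_true, Bool.not_eq_eq_eq_not, Bool.not_true, decide_eq_false_iff_not]
  constructor
  · intro hx w hw hws; exact hx w hws hw
  · intro hx w hws hw; exact hx w hw hws

-- the two greedy loops agree cell by cell
theorem pv_fold_cells (words : List String) (d : PySem.Dict String String) :
    ∀ (cells : List (Nat × Nat)) (y : String) (u : PySem.Dict String Bool) (s : PySem.Set String),
    pvRel u s →
    (cells.foldl (fun st c => pvStepA d st (List.take c.1 (List.drop c.2 words))) (y, u)).1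
      = ((cells.flatMap (pvEventOf words d)).foldl (pvStepB words) (y, s)).1 := by
  intro cells
  induction cells with
  | nil => intro y u s _; simp
  | cons c cells ih =>
    intro y u s hrel
    rw [List.foldl_cons, List.flatMap_cons, List.foldl_append]
    have hguard : pvCanUse u (List.take c.1 (List.drop c.2 words))
        = PySem.Set.isdisjoint s (List.take c.1 (List.drop c.2 words)) := by
      rw [pv_canUse_eq, pv_isdisjoint_eq]
      congr 1
      funext w
      rw [hrel w]
    by_cases hcon : d.contains (pvSent words c) = true
    · have hev : pvEventOf words d c
          = [((c.1 : Int), (c.2 : Int), pvSent words c, d.getD (pvSent words c) "")] := by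
        unfold pvEventOf
        rw [if_pos hcon]
      rw [hev, List.foldl_cons, List.foldl_nil]
      simp only [pvStepA, pvStepB]
      rw [PySem.List.slice_natCast_add]
      rw [show PySem.Str.join " " (List.take c.1 (List.drop c.2 words)) = pvSent words c from rfl,
        hcon, hguard, Bool.true_and]
      cases hdis : PySem.Set.isdisjoint s (List.take c.1 (List.drop c.2 words)) with
      | false =>
        simp only [Bool.false_eq_true, if_false]
        exact ih y u s hrel
      | true =>
        simp only [if_true]
        have hrel' : pvRel (pvUsing u (List.take c.1 (List.drop c.2 words)))
            (PySem.Set.update s (List.take c.1 (List.drop c.2 words))) := by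
          intro w
          rw [pv_using_eq, pv_getD_insert_true, hrel w]
          have : (w ∈ PySem.Set.update s (List.take c.1 (List.drop c.2 words)))
              ↔ (w ∈ s ∨ w ∈ List.take c.1 (List.drop c.2 words)) :=
            PySem.Set.mem_update _ _ _
          simp [this]
        rw [pv_whitelist_eq]
        by_cases hwl : (d.getD (pvSent words c) "") ∈ pvWhitelistB
        · rw [if_pos (by simpa using hwl), if_pos (by simpa using hwl)]
          exact ih _ _ _ hrel'
        · rw [if_neg (by simpa using hwl), if_neg (by simpa using hwl)]
          exact ih _ _ _ hrel'
    · have hev : pvEventOf words d c = [] := by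
        unfold pvEventOf
        rw [if_neg hcon]
      rw [hev, List.foldl_nil]
      simp only [pvStepA]
      rw [show PySem.Str.join " " (List.take c.1 (List.drop c.2 words)) = pvSent words c from rfl,
        eq_false_of_ne_true hcon, Bool.false_and]
      simp only [Bool.false_eq_true, if_false]
      exact ih y u s hrel

-- the two programs compute the same value
theorem pv_main (x : String) (objs : List (String × String)) :
    combine_objs x objs = combine_objs_alt x objs := by
  simp only [combine_objs, combine_objs_alt]
  rw [pv_combs_eq, pv_sorted_combs, pv_sorted_events]
  have hcells : (List.range (PySem.Str.split₀ x).length).flatMap (fun j =>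
        (List.range (j + 1)).map (fun i =>
          List.take ((PySem.Str.split₀ x).length - j) (List.drop i (PySem.Str.split₀ x))))
      = (pvCells (PySem.Str.split₀ x).length).map
          (fun c => List.take c.1 (List.drop c.2 (PySem.Str.split₀ x))) := by
    unfold pvCells
    rw [List.map_flatMap]
    apply pv_flatMap_congr
    intro j _
    rw [List.map_map]
    rfl
  rw [hcells, List.foldl_map]
  apply pv_fold_cells
  intro w
  rw [pv_getD_insert_false]
  split
  · simp [PySem.Set.empty]
  · simp [PySem.Set.empty]

-- ===== VERDICT (by name: the statement is the Claim_ definition above) =====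
theorem combine_objs_spec : Claim_equal_combine_objs := fun x objs _ => pv_main x objs
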